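-- pv_equiv track=rewrite | github.com/bigdream96/coding-test-source | src/main/java/com/codingtest/source/programmers/p87946/solution.py | search
-- ===== SOURCE A (Python) =====
-- def search(k, dungeons):
--     answer = 0
--
--     for i, v in enumerate(dungeons):
--         if k >= v[0]:
--             answer += 1
--             k -= v[1]
--         else:
--             return answer
--
--     return answer
-- ===== SOURCE B (Python) =====
-- def search(k, dungeons):
--     dungeons = list(dungeons)
--     prefix = [0]
--     for v in dungeons:
--         prefix.append(prefix[-1] + v[1])
--     for i in range(len(dungeons)):
--         if k - prefix[i] < dungeons[i][0]:
--             return i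
--     return len(dungeons)
-- ===== Notes on version B (the rewrite author's own statement) =====
-- stated objective: alternative
-- what changed: B first materializes a prefix-sum table of the exit costs in one pass, then a second index loop returns the first i where the remaining fatigue k - prefix[i] is below dungeons[i][0]; no running mutation of k and the answer is the stopping index itself.
-- outside the precondition, e.g. on search(0, [[5]]): A returns 0, B raises IndexError
import Mathlib
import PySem

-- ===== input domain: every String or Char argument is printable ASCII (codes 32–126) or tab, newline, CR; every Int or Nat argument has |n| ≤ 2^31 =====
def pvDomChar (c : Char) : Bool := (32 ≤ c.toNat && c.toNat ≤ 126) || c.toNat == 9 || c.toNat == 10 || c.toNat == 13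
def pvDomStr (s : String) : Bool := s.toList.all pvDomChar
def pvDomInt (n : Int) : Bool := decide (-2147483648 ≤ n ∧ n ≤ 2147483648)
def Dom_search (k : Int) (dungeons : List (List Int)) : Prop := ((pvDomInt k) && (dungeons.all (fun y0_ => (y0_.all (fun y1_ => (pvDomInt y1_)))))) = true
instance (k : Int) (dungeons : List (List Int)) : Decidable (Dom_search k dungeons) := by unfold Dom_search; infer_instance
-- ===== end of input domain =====

-- B builds a prefix-sum table of exit costs, then finds the first index whose entry cost exceeds the remaining fatigue (alternative decomposition, same cost).


-- ===== PORT A =====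
-- loop of A: answer counts rows while k ≥ v[0]; a missing v[0]/v[1] is an IndexError in Python (excluded by Pre_)
def searchGo (k : Int) (answer : Int) : List (List Int) → Int
  | [] => answer
  | v :: rest =>
    match PySem.List.pyGet? v 0 with
    | none => answer          -- IndexError in Python; outside Pre_
    | some a =>
      if k ≥ a then
        match PySem.List.pyGet? v 1 with
        | none => answer + 1  -- IndexError in Python; outside Pre_
        | some b => searchGo (k - b) (answer + 1) rest
      else answer

def search (k : Int) (dungeons : List (List Int)) : Int := searchGo k 0 dungeons

-- ===== PORT B =====
-- first pass of Source B: prefix = [0]; for v in dungeons: prefix.append(prefix[-1] + v[1])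
def altPrefix (dungeons : List (List Int)) : List Int :=
  (dungeons.foldl
    (fun (p : List Int × Int) v =>
      let s := p.2 + (PySem.List.pyGet? v 1).getD 0   -- v[1]; none = IndexError, outside Pre_
      (p.1 ++ [s], s))
    ([0], 0)).1

-- second pass of Source B: for i in range(len(dungeons)): if k - prefix[i] < dungeons[i][0]: return i; return len
def altScan (k : Int) (i : Int) : List Int → List (List Int) → Int
  | p :: ps, v :: vs =>
    if k - p < (PySem.List.pyGet? v 0).getD 0 then i else altScan k (i + 1) ps vs
  | _, _ => i

def search_alt (k : Int) (dungeons : List (List Int)) : Int :=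
  altScan k 0 (altPrefix dungeons) dungeons

-- ===== PRECONDITION & SPEC =====
-- Pre_ requires every row to have both entries v[0], v[1]. A short row makes A raise IndexError when reached;
-- this also excludes some inputs where A returns early before reaching a short row (e.g. (0, [[5]])), on which
-- B's prefix pass raises IndexError.
def Pre_search (k : Int) (dungeons : List (List Int)) : Prop :=
  ∀ v ∈ dungeons, 2 ≤ v.length
instance (k : Int) (dungeons : List (List Int)) : Decidable (Pre_search k dungeons) := by unfold Pre_search; infer_instance
def pvWitness_search : Int × List (List Int) := (10, [[3, 5], [4, 2], [80, 1]])

def Spec_search (k : Int) (dungeons : List (List Int)) (out : Int) : Prop := out = search_alt k dungeons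
instance (k : Int) (dungeons : List (List Int)) (out : Int) : Decidable (Spec_search k dungeons out) := by unfold Spec_search; infer_instance

-- ===== CLAIM (what is proved, stated in full; the proofs are below) =====
def Claim_equal_search : Prop := ∀ (k : Int) (dungeons : List (List Int)), Dom_search k dungeons → Pre_search k dungeons → Spec_search k dungeons (search k dungeons)

-- ===== LEMMAS AND PROOFS =====

-- proof-only helper: what the prefix-building fold produces, relative to a running sum c
def prefixFrom (c : Int) : List (List Int) → List Int
  | [] => [c]
  | v :: vs => c :: prefixFrom (c + (PySem.List.pyGet? v 1).getD 0) vs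

theorem altPrefix_fold (vs : List (List Int)) : ∀ (acc : List Int) (c : Int),
    (vs.foldl (fun (p : List Int × Int) v =>
        let s := p.2 + (PySem.List.pyGet? v 1).getD 0
        (p.1 ++ [s], s)) (acc ++ [c], c)) = (acc ++ prefixFrom c vs, c + (vs.map (fun v => (PySem.List.pyGet? v 1).getD 0)).sum) := by
  induction vs with
  | nil => simp [prefixFrom]
  | cons v vs ih =>
    intro acc c
    simp only [List.foldl_cons]
    have h := ih (acc ++ [c]) (c + (PySem.List.pyGet? v 1).getD 0)
    simp only [List.append_assoc, List.cons_append, List.nil_append] at h ⊢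
    rw [h]
    simp [prefixFrom]
    ring

theorem altPrefix_eq (dungeons : List (List Int)) : altPrefix dungeons = prefixFrom 0 dungeons := by
  unfold altPrefix
  have := altPrefix_fold dungeons [] 0
  simpa using congrArg Prod.fst this

theorem searchGo_shift (vs : List (List Int)) : ∀ (k ans : Int),
    searchGo k ans vs = ans + searchGo k 0 vs := by
  induction vs with
  | nil => intro k ans; simp [searchGo]
  | cons v vs ih =>
    intro k ans
    cases h0 : PySem.List.pyGet? v 0 with
    | none => simp [searchGo, h0]
    | some a =>
      cases h1 : PySem.List.pyGet? v 1 with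
      | none =>
        by_cases hk : k ≥ a
        · simp [searchGo, h0, h1, hk]
        · simp [searchGo, h0, hk]
      | some b =>
        by_cases hk : k ≥ a
        · simp only [searchGo, h0, h1, if_pos hk]
          rw [ih (k - b) (ans + 1), ih (k - b) (0 + 1)]
          ring
        · simp [searchGo, h0, hk]

theorem pyGet?_len2 {v : List Int} (h : 2 ≤ v.length) :
    (∃ a, PySem.List.pyGet? v 0 = some a) ∧ (∃ b, PySem.List.pyGet? v 1 = some b) := by
  match v, h with
  | a :: b :: rest, _ =>
    refine ⟨⟨a, ?_⟩, ⟨b, ?_⟩⟩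
    · rw [show ((0:Int)) = ((0:Nat):Int) from rfl, PySem.List.pyGet?_natCast]; rfl
    · rw [show ((1:Int)) = ((1:Nat):Int) from rfl, PySem.List.pyGet?_natCast]; rfl

theorem main_lemma (vs : List (List Int)) : ∀ (k c i : Int),
    (∀ v ∈ vs, 2 ≤ v.length) →
    altScan k i (prefixFrom c vs) vs = i + searchGo (k - c) 0 vs := by
  induction vs with
  | nil => intro k c i _; simp [prefixFrom, altScan, searchGo]
  | cons v vs ih =>
    intro k c i hpre
    obtain ⟨⟨a, ha⟩, ⟨b, hb⟩⟩ := pyGet?_len2 (hpre v (by simp))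
    simp only [prefixFrom, altScan, searchGo, ha, hb, Option.getD_some]
    by_cases hk : k - c < a
    · have : ¬ (k - c ≥ a) := by omega
      simp [hk, this]
    · have hge : k - c ≥ a := by omega
      simp only [if_neg hk, if_pos hge]
      rw [ih k (c + b) (i + 1) (fun w hw => hpre w (by simp [hw]))]
      rw [searchGo_shift vs (k - c - b) (0 + 1)]
      have : k - (c + b) = k - c - b := by ring
      rw [this]
      ring

-- ===== VERDICT (by name: the statement is the Claim_ definition above) =====
theorem search_spec : Claim_equal_search := by
  intro k dungeons _ hpre
  unfold Spec_search search search_alt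
  rw [altPrefix_eq, main_lemma dungeons k 0 0 hpre]
  simp
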